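-- pv_equiv track=rewrite | github.com/dekekincaid/nuke.env | python/missingFrames.py | cleanUpList
-- ===== SOURCE A (Python) =====
-- def cleanUpList(missingFrames):
--
-- 	cleanMissingFrames = []
-- 	missingFramesNice = ""
-- 	dirtySize = 0
-- 	minV = 0
-- 	maxV = 0
--
-- 	dirtySize = len(missingFrames)
--
-- 	minV = missingFrames[0]
-- 	maxV = missingFrames[0]
--
-- 	for i in range(dirtySize):
-- 		if (missingFrames[i] == (maxV+1)):
-- 			#as long as the frames are in sequence, update the maxV value
-- 			maxV = missingFrames[i]
-- 		else:
-- 			#if not in sequence, set the values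
-- 			cleanMissingFrames.append(minV)
-- 			cleanMissingFrames.append(maxV)
-- 			minV = maxV = missingFrames[i];
--
-- 		if (i == (dirtySize-1)):
-- 			#write the values if the list is at the end
-- 			cleanMissingFrames.append(minV)
-- 			cleanMissingFrames.append(maxV)
--
-- 	for i in range(2,len(cleanMissingFrames),2):
-- 		# create the formated output of the frames in the window for the user to shorten the list
-- 		if(cleanMissingFrames[i] == cleanMissingFrames[i+1]):
-- 			missingFramesNice += (str)(cleanMissingFrames[i]) + ", "
-- 		else:
-- 			missingFramesNice += (str)(cleanMissingFrames[i]) + "-" + (str)(cleanMissingFrames[i+1]) + ", "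
--
--
-- 	return missingFramesNice
-- ===== SOURCE B (Python) =====
-- def cleanUpList(missingFrames):
--     n = len(missingFrames)
--     breaks = [i + 1 for i, (a, b) in enumerate(zip(missingFrames, missingFrames[1:])) if b != a + 1]
--     bounds = [0] + breaks + [n]
--     pieces = [str(missingFrames[lo]) + ", " if missingFrames[lo] == missingFrames[hi - 1]
--               else str(missingFrames[lo]) + "-" + str(missingFrames[hi - 1]) + ", "
--               for lo, hi in zip(bounds, bounds[1:])]
--     return "".join(pieces)
-- ===== Notes on version B (the rewrite author's own statement) =====
-- stated objective: alternative
-- what changed: B works in staged passes with no running min/max state: it first computes the break positions from adjacent pairs (enumerate over zip of the list with its tail), turns them into a bounds list, and then formats each segment by indexing the original list at the two segment endpoints; A instead runs one stateful scan accumulating minV/maxV into a flat interleaved list headed by a dummy pair and formats it with an index-stepping loop that skips the first two slots.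
import Mathlib
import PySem

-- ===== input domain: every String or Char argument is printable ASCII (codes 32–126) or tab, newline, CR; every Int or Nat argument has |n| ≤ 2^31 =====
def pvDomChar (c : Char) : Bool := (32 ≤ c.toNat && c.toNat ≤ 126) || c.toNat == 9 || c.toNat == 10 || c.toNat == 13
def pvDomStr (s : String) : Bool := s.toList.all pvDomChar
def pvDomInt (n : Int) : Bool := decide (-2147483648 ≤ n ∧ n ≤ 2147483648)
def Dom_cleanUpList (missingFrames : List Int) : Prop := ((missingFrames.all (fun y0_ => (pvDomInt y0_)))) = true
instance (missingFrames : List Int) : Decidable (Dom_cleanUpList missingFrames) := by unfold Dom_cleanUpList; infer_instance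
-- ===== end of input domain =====

-- B replaces A's stateful min/max scan and dummy-headed flat list with staged passes:
-- break positions from adjacent pairs, a bounds list, then formatting by endpoint indexing. Objective: alternative.

-- ===== PORT A =====
def cleanUpList (missingFrames : List Int) : String :=
  let dirtySize : Int := missingFrames.length
  let minV : Int := PySem.List.pyGetD missingFrames 0 0
  let maxV : Int := minV
  let st :=
    (PySem.List.pyRange 0 dirtySize 1).foldl
      (fun (s : List Int × Int × Int) i =>
        let x := PySem.List.pyGetD missingFrames i 0
        let s' :=
          if x = s.2.2 + 1 then (s.1, s.2.1, x)
          else (s.1 ++ [s.2.1, s.2.2], x, x)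
        if i = dirtySize - 1 then (s'.1 ++ [s'.2.1, s'.2.2], s'.2.1, s'.2.2)
        else s')
      ([], minV, maxV)
  let cleanMissingFrames := st.1
  (PySem.List.pyRange 2 cleanMissingFrames.length 2).foldl
    (fun acc i =>
      let a := PySem.List.pyGetD cleanMissingFrames i 0
      let b := PySem.List.pyGetD cleanMissingFrames (i + 1) 0
      if a = b then acc ++ PySem.Int.toStr a ++ ", "
      else acc ++ PySem.Int.toStr a ++ "-" ++ PySem.Int.toStr b ++ ", ")
    ""

-- ===== PORT B =====
def cleanUpList_alt (missingFrames : List Int) : String :=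
  let n : Int := missingFrames.length
  let breaks : List Int :=
    (PySem.List.enumerate (List.zip missingFrames (PySem.List.slice missingFrames (some 1) none)) 0).filterMap
      (fun p => if p.2.2 ≠ p.2.1 + 1 then some (p.1 + 1) else none)
  let bounds : List Int := [0] ++ breaks ++ [n]
  let pieces : List String :=
    (List.zip bounds (bounds.drop 1)).map
      (fun q =>
        if PySem.List.pyGetD missingFrames q.1 0 = PySem.List.pyGetD missingFrames (q.2 - 1) 0 then
          PySem.Int.toStr (PySem.List.pyGetD missingFrames q.1 0) ++ ", "
        else
          PySem.Int.toStr (PySem.List.pyGetD missingFrames q.1 0) ++ "-" ++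
            PySem.Int.toStr (PySem.List.pyGetD missingFrames (q.2 - 1) 0) ++ ", ")
  PySem.Str.join "" pieces

-- ===== PRECONDITION & SPEC =====
-- Pre_ excludes only the empty list, on which both A and B raise IndexError.
def Pre_cleanUpList (missingFrames : List Int) : Prop := missingFrames ≠ []
instance (missingFrames : List Int) : Decidable (Pre_cleanUpList missingFrames) := by
  unfold Pre_cleanUpList; infer_instance
def pvWitness_cleanUpList : List Int := [1, 2, 3, 7, 9]

def Spec_cleanUpList (missingFrames : List Int) (out : String) : Prop := out = cleanUpList_alt missingFrames
instance (missingFrames : List Int) (out : String) : Decidable (Spec_cleanUpList missingFrames out) := by unfold Spec_cleanUpList; infer_instance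

-- ===== CLAIM (what is proved, stated in full; the proofs are below) =====
def Claim_equal_cleanUpList : Prop := ∀ (missingFrames : List Int), Dom_cleanUpList missingFrames → Pre_cleanUpList missingFrames → Spec_cleanUpList missingFrames (cleanUpList missingFrames)

-- ===== LEMMAS AND PROOFS =====

-- proof-side reference: the list of (start, end) runs of a list, given current run start and previous element
def pvRuns (start prev : Int) : List Int → List (Int × Int)
  | [] => [(start, prev)]
  | x :: xs => if x = prev + 1 then pvRuns start x xs
               else (start, prev) :: pvRuns x x xs

-- proof-side flat interleaved list of a run list (A's cleanMissingFrames shape)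
def pvFlat (rs : List (Int × Int)) : List Int := rs.flatMap (fun p => [p.1, p.2])

-- proof-side formatting of one run
def pvFmtRun (p : Int × Int) : String :=
  if p.1 = p.2 then PySem.Int.toStr p.1 ++ ", "
  else PySem.Int.toStr p.1 ++ "-" ++ PySem.Int.toStr p.2 ++ ", "

-- proof-side concatenation of formatted runs
def pvCat : List (Int × Int) → String
  | [] => ""
  | p :: rs => pvFmtRun p ++ pvCat rs

-- joining the formatted runs equals pvCat
theorem pvB_join (rs : List (Int × Int)) :
    PySem.Str.join "" (rs.map pvFmtRun) = pvCat rs := by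
  induction rs with
  | nil =>
    apply String.toList_inj.mp
    simp [PySem.Str.toList_join, PySem.Chars.join_nil, pvCat]
  | cons p rs ih =>
    cases rs with
    | nil =>
      apply String.toList_inj.mp
      simp [PySem.Str.toList_join, PySem.Chars.join_singleton, pvCat]
    | cons q rest =>
      apply String.toList_inj.mp
      have h := congrArg String.toList ih
      simp only [PySem.Str.toList_join, List.map_cons, List.map_map] at h
      rw [PySem.Str.toList_join]
      simp only [List.map_cons, List.map_map]
      rw [PySem.Chars.join_cons_cons]
      simp only [show ("" : String).toList = [] from rfl] at h
      simp [pvCat, h]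

-- step-2 range cons (range(i, b, 2) for A's formatting loop)
theorem pvRange2_cons (a b : Int) (h : a < b) :
    PySem.List.pyRange a b 2 = a :: PySem.List.pyRange (a + 2) b 2 := by
  rw [PySem.List.pyRange_of_pos a b (by norm_num),
      PySem.List.pyRange_of_pos (a + 2) b (by norm_num)]
  by_cases h2 : a + 2 < b
  · have hc : ((b - a + 2 - 1) / 2).toNat = ((b - (a + 2) + 2 - 1) / 2).toNat + 1 := by omega
    simp only [if_pos h, if_pos h2, hc, List.range_succ_eq_map, List.map_cons, List.map_map]
    refine List.cons_eq_cons.mpr ⟨by simp, ?_⟩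
    apply List.map_congr_left; intro k _
    simp only [Function.comp_apply]
    push_cast
    ring
  · have hc : ((b - a + 2 - 1) / 2).toNat = 1 := by omega
    simp [if_pos h, if_neg h2, hc, List.range_succ]

-- A's formatting loop over the flat run list equals pvCat
theorem pvA_fmt (rs : List (Int × Int)) (pre : List Int) (acc : String) :
    (PySem.List.pyRange (pre.length : Int) (((pre ++ pvFlat rs).length : Int)) 2).foldl
      (fun acc i =>
        let a := PySem.List.pyGetD (pre ++ pvFlat rs) i 0
        let b := PySem.List.pyGetD (pre ++ pvFlat rs) (i + 1) 0
        if a = b then acc ++ PySem.Int.toStr a ++ ", "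
        else acc ++ PySem.Int.toStr a ++ "-" ++ PySem.Int.toStr b ++ ", ") acc
    = acc ++ pvCat rs := by
  induction rs generalizing pre acc with
  | nil =>
    rw [PySem.List.pyRange_of_pos _ _ (by norm_num)]
    simp [pvFlat, pvCat]
  | cons p rs ih =>
    have hsplit : pre ++ pvFlat (p :: rs) = pre ++ p.1 :: p.2 :: pvFlat rs := by
      simp [pvFlat]
    have hlt : (pre.length : Int) < ((pre ++ pvFlat (p :: rs)).length : Int) := by
      rw [hsplit]; simp; omega
    rw [pvRange2_cons _ _ hlt, List.foldl_cons]
    have hg1 : PySem.List.pyGetD (pre ++ pvFlat (p :: rs)) (pre.length : Int) 0 = p.1 := by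
      rw [hsplit]; simp [PySem.List.pyGetD]
    have hg2 : PySem.List.pyGetD (pre ++ pvFlat (p :: rs)) ((pre.length : Int) + 1) 0 = p.2 := by
      rw [hsplit]
      have h1 := PySem.List.pyGet?_append_right pre (p.1 :: p.2 :: pvFlat rs) 1
      simp only [Nat.cast_one] at h1
      simp [PySem.List.pyGetD, h1]
    have hre : pre ++ pvFlat (p :: rs) = (pre ++ [p.1, p.2]) ++ pvFlat rs := by
      simp [pvFlat]
    have hlen2 : (pre.length : Int) + 2 = (((pre ++ [p.1, p.2]).length : Nat) : Int) := by
      push_cast [List.length_append, List.length_cons, List.length_nil]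
      ring
    simp only [hg1, hg2]
    by_cases h : p.1 = p.2
    · rw [if_pos h]
      calc (PySem.List.pyRange ((pre.length : Int) + 2)
              (((pre ++ pvFlat (p :: rs)).length : Int)) 2).foldl _ (acc ++ PySem.Int.toStr p.1 ++ ", ")
          = (acc ++ PySem.Int.toStr p.1 ++ ", ") ++ pvCat rs := by
            rw [hlen2]
            conv_lhs => rw [hre]
            exact ih (pre ++ [p.1, p.2]) _
        _ = acc ++ pvCat (p :: rs) := by
            simp [pvCat, pvFmtRun, h, String.append_assoc]
    · rw [if_neg h]
      calc (PySem.List.pyRange ((pre.length : Int) + 2)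
              (((pre ++ pvFlat (p :: rs)).length : Int)) 2).foldl _
              (acc ++ PySem.Int.toStr p.1 ++ "-" ++ PySem.Int.toStr p.2 ++ ", ")
          = (acc ++ PySem.Int.toStr p.1 ++ "-" ++ PySem.Int.toStr p.2 ++ ", ") ++ pvCat rs := by
            rw [hlen2]
            conv_lhs => rw [hre]
            exact ih (pre ++ [p.1, p.2]) _
        _ = acc ++ pvCat (p :: rs) := by
            simp [pvCat, pvFmtRun, h, String.append_assoc]

-- A's first loop, seen over enumerate, accumulates the flat run list (nonempty suffix form)
theorem pvA_loop (n : Int) (x : Int) (ys : List Int) (k : Int) (clean : List Int)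
    (start prev : Int) (hk : k + 1 + (ys.length : Int) = n) :
    ∃ a b,
      (PySem.List.enumerate (x :: ys) k).foldl
        (fun (s : List Int × Int × Int) (ix : Int × Int) =>
          let s' :=
            if ix.2 = s.2.2 + 1 then (s.1, s.2.1, ix.2)
            else (s.1 ++ [s.2.1, s.2.2], ix.2, ix.2)
          if ix.1 = n - 1 then (s'.1 ++ [s'.2.1, s'.2.2], s'.2.1, s'.2.2)
          else s') (clean, start, prev)
      = (clean ++ pvFlat (pvRuns start prev (x :: ys)), a, b) := by
  induction ys generalizing x k clean start prev with
  | nil =>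
    have hlast : k = n - 1 := by simp at hk; omega
    simp only [PySem.List.enumerate_cons, PySem.List.enumerate_nil, List.foldl_cons,
      List.foldl_nil, pvRuns]
    by_cases h : x = prev + 1
    · exact ⟨start, x, by simp [h, hlast, pvFlat]⟩
    · exact ⟨x, x, by simp [h, hlast, pvFlat]⟩
  | cons y ys ih =>
    have hnl : ¬ (k = n - 1) := by push_cast [List.length_cons] at hk; omega
    by_cases h : x = prev + 1
    · rw [show pvRuns start prev (x :: y :: ys) = pvRuns start x (y :: ys) by
          simp [pvRuns, h]]
      have := ih y (k + 1) clean start x (by push_cast [List.length_cons] at hk ⊢; omega)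
      rw [PySem.List.enumerate_cons, List.foldl_cons]
      simpa [h, hnl] using this
    · rw [show pvRuns start prev (x :: y :: ys) = (start, prev) :: pvRuns x x (y :: ys) by
          simp [pvRuns, h]]
      obtain ⟨a, b, hab⟩ := ih y (k + 1) (clean ++ [start, prev]) x x
        (by push_cast [List.length_cons] at hk ⊢; omega)
      refine ⟨a, b, ?_⟩
      rw [PySem.List.enumerate_cons, List.foldl_cons]
      simp only [pvFlat, List.flatMap_cons] at hab ⊢
      simpa [h, hnl, List.append_assoc] using hab

-- A's first loop, in index form, accumulates the flat run list
theorem pvA_clean (x0 : Int) (xs : List Int) :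
    ∃ a b,
      (PySem.List.pyRange 0 (((x0 :: xs).length : Nat) : Int) 1).foldl
        (fun (s : List Int × Int × Int) i =>
          let x := PySem.List.pyGetD (x0 :: xs) i 0
          let s' :=
            if x = s.2.2 + 1 then (s.1, s.2.1, x)
            else (s.1 ++ [s.2.1, s.2.2], x, x)
          if i = (((x0 :: xs).length : Nat) : Int) - 1 then
            (s'.1 ++ [s'.2.1, s'.2.2], s'.2.1, s'.2.2)
          else s') ([], PySem.List.pyGetD (x0 :: xs) 0 0, PySem.List.pyGetD (x0 :: xs) 0 0)
      = (pvFlat (pvRuns x0 x0 (x0 :: xs)), a, b) := by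
  rw [PySem.List.pyGetD_zero_cons x0 xs 0]
  obtain ⟨a, b, hab⟩ := pvA_loop (((x0 :: xs).length : Nat) : Int) x0 xs 0 [] x0 x0
    (by push_cast [List.length_cons]; ring)
  rw [PySem.List.enumerate_eq_map_pyRange (x0 :: xs) 0, List.foldl_map] at hab
  exact ⟨a, b, hab⟩

-- A on a nonempty list formats exactly the runs of the tail
theorem pvA_eq (x0 : Int) (xs : List Int) :
    cleanUpList (x0 :: xs) = pvCat (pvRuns x0 x0 xs) := by
  obtain ⟨a, b, hab⟩ := pvA_clean x0 xs
  have hclean := congrArg Prod.fst hab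
  have key : ∀ clean : List Int, clean = pvFlat (pvRuns x0 x0 (x0 :: xs)) →
      (PySem.List.pyRange 2 ((clean.length : Nat) : Int) 2).foldl
        (fun acc i =>
          let a := PySem.List.pyGetD clean i 0
          let b := PySem.List.pyGetD clean (i + 1) 0
          if a = b then acc ++ PySem.Int.toStr a ++ ", "
          else acc ++ PySem.Int.toStr a ++ "-" ++ PySem.Int.toStr b ++ ", ") ""
      = pvCat (pvRuns x0 x0 xs) := by
    intro clean hc
    subst hc
    rw [show pvRuns x0 x0 (x0 :: xs) = (x0, x0) :: pvRuns x0 x0 xs from by simp [pvRuns],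
        show pvFlat ((x0, x0) :: pvRuns x0 x0 xs)
              = [x0, x0] ++ pvFlat (pvRuns x0 x0 xs) from by simp [pvFlat]]
    have h := pvA_fmt (pvRuns x0 x0 xs) [x0, x0] ""
    simpa using h
  exact key _ hclean

-- ========== B-side lemmas ==========

-- proof-side break positions: (k+1)-indexed break before each element not continuing its predecessor
def pvBreaks (k : Int) (prev : Int) : List Int → List Int
  | [] => []
  | y :: t => if y = prev + 1 then pvBreaks (k + 1) y t else (k + 1) :: pvBreaks (k + 1) y t

-- B's break comprehension computes pvBreaks
theorem pvBreaks_eq (t : List Int) (k prev : Int) :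
    (PySem.List.enumerate (List.zip (prev :: t) t) k).filterMap
      (fun p => if p.2.2 ≠ p.2.1 + 1 then some (p.1 + 1) else none)
    = pvBreaks k prev t := by
  induction t generalizing k prev with
  | nil => simp [pvBreaks, PySem.List.enumerate_nil]
  | cons y t ih =>
    by_cases h : y = prev + 1
    · simpa [List.zip_cons_cons, PySem.List.enumerate_cons, List.filterMap_cons, pvBreaks, h]
        using ih (k + 1) y
    · simpa [List.zip_cons_cons, PySem.List.enumerate_cons, List.filterMap_cons, pvBreaks, h]
        using ih (k + 1) y

-- main B lemma: the endpoint pairs read off the bounds list are exactly the runs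
theorem pvB_main (mf : List Int) (t : List Int) (k j : Nat) (start prev : Int)
    (hdrop : mf.drop k = prev :: t) (hj : mf[j]? = some start) :
    (List.zip ((j : Int) :: (pvBreaks (k : Int) prev t ++ [(mf.length : Int)]))
              (((j : Int) :: (pvBreaks (k : Int) prev t ++ [(mf.length : Int)])).drop 1)).map
      (fun q => (PySem.List.pyGetD mf q.1 0, PySem.List.pyGetD mf (q.2 - 1) 0))
    = pvRuns start prev t := by
  induction t generalizing k j start prev with
  | nil =>
    have hlen : mf.length = k + 1 := by
      have := congrArg List.length hdrop
      simp at this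
      omega
    have hk : mf[k]? = some prev := by
      have h0 := congrArg (fun (l : List Int) => l[0]?) hdrop
      simp only [List.getElem?_drop] at h0
      simpa using h0
    simp only [pvBreaks, List.nil_append, List.drop_succ_cons, List.drop_zero,
      List.zip_cons_cons, List.zip_nil_right, List.map_cons, List.map_nil, pvRuns]
    have e1 : PySem.List.pyGetD mf (j : Int) 0 = start := by
      rw [PySem.List.pyGetD_natCast]
      simp [List.getD, hj]
    have e2 : PySem.List.pyGetD mf ((mf.length : Int) - 1) 0 = prev := by
      rw [show ((mf.length : Int) - 1) = ((k : Nat) : Int) by rw [hlen]; push_cast; ring,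
        PySem.List.pyGetD_natCast]
      simp [List.getD, hk]
    rw [e1, e2]
  | cons y t ih =>
    have hdrop' : mf.drop (k + 1) = y :: t := by
      have := congrArg List.tail hdrop
      simpa [List.tail_drop] using this
    have hk : mf[k]? = some prev := by
      have h0 := congrArg (fun (l : List Int) => l[0]?) hdrop
      simp only [List.getElem?_drop] at h0
      simpa using h0
    have hk1 : mf[k + 1]? = some y := by
      have h0 := congrArg (fun (l : List Int) => l[0]?) hdrop'
      simp only [List.getElem?_drop] at h0
      simpa using h0
    by_cases h : y = prev + 1
    · have hb : pvBreaks (k : Int) prev (y :: t) = pvBreaks ((k : Int) + 1) y t := by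
        simp [pvBreaks, h]
      rw [hb, show ((k : Int) + 1) = (((k + 1 : Nat) : Nat) : Int) by push_cast; ring,
        show pvRuns start prev (y :: t) = pvRuns start y t by simp [pvRuns, h]]
      exact ih (k + 1) j start y hdrop' hj
    · have hb : pvBreaks (k : Int) prev (y :: t)
          = ((k : Int) + 1) :: pvBreaks ((k : Int) + 1) y t := by
        simp [pvBreaks, h]
      rw [hb]
      have hcast : ((k : Int) + 1) = (((k + 1 : Nat) : Nat) : Int) := by push_cast; ring
      rw [hcast]
      simp only [List.cons_append, List.drop_succ_cons, List.drop_zero, List.zip_cons_cons,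
        List.map_cons]
      have e1 : PySem.List.pyGetD mf (j : Int) 0 = start := by
        rw [PySem.List.pyGetD_natCast]
        simp [List.getD, hj]
      have e2 : PySem.List.pyGetD mf (((k + 1 : Nat) : Int) - 1) 0 = prev := by
        rw [show (((k + 1 : Nat) : Int) - 1) = ((k : Nat) : Int) by push_cast; ring,
          PySem.List.pyGetD_natCast]
        simp [List.getD, hk]
      rw [e1, e2, show pvRuns start prev (y :: t) = (start, prev) :: pvRuns y y t by
        simp [pvRuns, h]]
      refine List.cons_eq_cons.mpr ⟨rfl, ?_⟩
      have := ih (k + 1) (k + 1) y y hdrop' hk1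
      simpa using this

-- B on a nonempty list formats exactly the runs of the tail
theorem pvB_eq (x0 : Int) (xs : List Int) :
    cleanUpList_alt (x0 :: xs) = pvCat (pvRuns x0 x0 xs) := by
  have hmain := pvB_main (x0 :: xs) xs 0 0 x0 x0 (by simp) (by simp)
  simp only [Nat.cast_zero] at hmain
  have hmap :
      (List.zip ((0 : Int) :: (pvBreaks 0 x0 xs ++ [((x0 :: xs).length : Int)]))
          (((0 : Int) :: (pvBreaks 0 x0 xs ++ [((x0 :: xs).length : Int)])).drop 1)).map
        (fun q =>
          if PySem.List.pyGetD (x0 :: xs) q.1 0 = PySem.List.pyGetD (x0 :: xs) (q.2 - 1) 0 then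
            PySem.Int.toStr (PySem.List.pyGetD (x0 :: xs) q.1 0) ++ ", "
          else
            PySem.Int.toStr (PySem.List.pyGetD (x0 :: xs) q.1 0) ++ "-" ++
              PySem.Int.toStr (PySem.List.pyGetD (x0 :: xs) (q.2 - 1) 0) ++ ", ")
      = (pvRuns x0 x0 xs).map pvFmtRun := by
    rw [← hmain, List.map_map]
    exact List.map_congr_left (fun q _ => by simp [pvFmtRun, Function.comp])
  unfold cleanUpList_alt
  simp only [PySem.List.slice_from_one, List.tail_cons, pvBreaks_eq xs 0 x0,
    List.cons_append, List.nil_append]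
  rw [hmap, pvB_join]

-- ===== VERDICT (by name: the statement is the Claim_ definition above) =====
theorem cleanUpList_spec : Claim_equal_cleanUpList := by
  intro mf _ hpre
  unfold Spec_cleanUpList
  cases mf with
  | nil => exact absurd rfl hpre
  | cons x0 xs => rw [pvA_eq, pvB_eq]
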